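-- pv_equiv track=rewrite | github.com/atakangol/sat-solver | naive_conflict.py | backtrack
-- ===== SOURCE A (Python) =====
-- def backtrack(guess):
--     if (len(guess) <= 3):
--         return(False,guess)
--     wrong = guess.pop()
--     if (wrong==0):
--         guess.append(1)
--         return(True,guess)
--     else:
--         return(backtrack(guess))
-- ===== SOURCE B (Python) =====
-- def backtrack(guess):
--     # Search-then-truncate instead of recursive popping; same in-place end state.
--     if len(guess) <= 3:
--         return (False, guess)
--     tail = guess[3:]
--     if 0 in tail:
--         keep = 3 + len(tail) - 1 - tail[::-1].index(0)
--         del guess[keep:]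
--         guess.append(1)
--         return (True, guess)
--     del guess[3:]
--     return (False, guess)
-- ===== Notes on version B (the rewrite author's own statement) =====
-- stated objective: alternative
-- what changed: Replaces A's tail recursion that pops one element per call with a single slice-and-search: find the last zero past index 3, truncate the list there and append 1 (or truncate to the first 3 elements if none).
import Mathlib
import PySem

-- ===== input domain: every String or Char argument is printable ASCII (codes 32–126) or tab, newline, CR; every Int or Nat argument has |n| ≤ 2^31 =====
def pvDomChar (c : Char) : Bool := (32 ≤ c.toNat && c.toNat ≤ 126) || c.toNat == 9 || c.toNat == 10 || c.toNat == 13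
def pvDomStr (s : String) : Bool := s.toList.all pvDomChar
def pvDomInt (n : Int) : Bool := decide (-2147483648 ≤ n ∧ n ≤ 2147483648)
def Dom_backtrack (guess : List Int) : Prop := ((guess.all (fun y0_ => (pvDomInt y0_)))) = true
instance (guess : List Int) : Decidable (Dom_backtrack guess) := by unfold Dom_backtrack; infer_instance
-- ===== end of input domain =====

-- B replaces A's pop-one-and-recurse with a single search for the last zero past index 3
-- and one truncation; equivalence is about the returned tuple (both mutate `guess` to the
-- same final list in Python).

-- ===== PORT A =====
def backtrack (guess : List Int) : Bool × List Int :=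
  if guess.length ≤ 3 then (false, guess)
  else
    match h : PySem.List.pop? guess with
    | none => (false, guess)   -- unreachable: guess is nonempty here (Python pop cannot raise)
    | some (wrong, g) =>
      if wrong = 0 then (true, g ++ [1])
      else backtrack g
termination_by guess.length
decreasing_by
  have := PySem.List.length_of_pop?_eq_some guess h
  simp_all; omega

-- ===== PORT B =====
def backtrack_alt (guess : List Int) : Bool × List Int :=
  if guess.length ≤ 3 then (false, guess)
  else
    let tail := PySem.List.slice guess (some 3) none
    if 0 ∈ tail then
      let keep := 3 + tail.length - 1 -
        ((PySem.List.index? ((PySem.List.slice? tail none none (-1)).getD []) 0).getD 0)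
      (true, guess.take keep ++ [1])
    else (false, guess.take 3)

-- ===== PRECONDITION & SPEC =====
def Spec_backtrack (guess : List Int) (out : Bool × List Int) : Prop := out = backtrack_alt guess
instance (guess : List Int) (out : Bool × List Int) : Decidable (Spec_backtrack guess out) := by unfold Spec_backtrack; infer_instance

-- ===== CLAIM (what is proved, stated in full; the proofs are below) =====
def Claim_equal_backtrack : Prop := ∀ (guess : List Int), Dom_backtrack guess → Spec_backtrack guess (backtrack guess)

-- ===== LEMMAS AND PROOFS =====

theorem backtrack_append (xs : List Int) (x : Int) (h : ¬ (xs ++ [x]).length ≤ 3) :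
    backtrack (xs ++ [x]) = if x = 0 then (true, xs ++ [1]) else backtrack xs := by
  rw [backtrack]
  simp only [h, if_false]
  split
  · next heq => rw [PySem.List.pop?_last] at heq; exact absurd heq (by simp)
  · next wrong g heq =>
      rw [PySem.List.pop?_last] at heq
      injection heq with h1
      injection h1 with ha hb
      subst ha; subst hb
      rfl

theorem backtrack_eq_alt (guess : List Int) : backtrack guess = backtrack_alt guess := by
  induction guess using List.reverseRecOn with
  | nil => simp [backtrack, backtrack_alt]
  | append_singleton xs x ih =>
    by_cases hlen : (xs ++ [x]).length ≤ 3
    · rw [backtrack, backtrack_alt]; simp only [hlen, if_true]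
    · have hx3 : 3 ≤ xs.length := by simp at hlen; omega
      have htail : PySem.List.slice (xs ++ [x]) (some 3) none = xs.drop 3 ++ [x] := by
        rw [PySem.List.slice_from _ (by norm_num)]
        simp
        exact List.drop_append_of_le_length hx3
      rw [backtrack_append xs x hlen, backtrack_alt]
      simp only [hlen, if_false, htail, PySem.List.slice?_none_none_neg_one, Option.getD_some]
      by_cases hx0 : x = 0
      · subst hx0
        simp only [List.mem_append, List.mem_singleton, or_true, if_pos]
        have hrev : (xs.drop 3 ++ [(0:Int)]).reverse = 0 :: (xs.drop 3).reverse := by simp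
        rw [hrev, PySem.List.index?_cons_self]
        simp only [Option.getD_some]
        have hk : 3 + (xs.drop 3 ++ [(0:Int)]).length - 1 - 0 = xs.length := by
          simp; omega
        rw [hk, List.take_append_of_le_length (le_refl _), List.take_length]
      · simp only [hx0, if_false]
        rw [ih, backtrack_alt]
        by_cases hxs3 : xs.length ≤ 3
        · have hxlen : xs.length = 3 := le_antisymm hxs3 hx3
          simp only [hxs3, if_true]
          have hd : xs.drop 3 = [] := List.drop_eq_nil_of_le (by omega)
          have hmem : ¬ (0 : Int) ∈ xs.drop 3 ++ [x] := by simp [hd, Ne.symm hx0]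
          simp only [hmem, if_false]
          rw [List.take_append_of_le_length hx3, List.take_of_length_le (by omega)]
        · simp only [hxs3, if_false]
          have htail' : PySem.List.slice xs (some 3) none = xs.drop 3 :=
            PySem.List.slice_from _ (by norm_num)
          rw [htail']
          by_cases hmem : (0 : Int) ∈ xs.drop 3
          · have hmem' : (0 : Int) ∈ xs.drop 3 ++ [x] := by simp [hmem]
            simp only [hmem, hmem', if_true, PySem.List.slice?_none_none_neg_one, Option.getD_some]
            obtain ⟨k, hk⟩ := Option.isSome_iff_exists.mp
              ((PySem.List.index?_isSome_iff _ _).mpr (by simpa using hmem : (0:Int) ∈ (xs.drop 3).reverse))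
            obtain ⟨hklt, -, -⟩ := PySem.List.getElem_of_index?_eq_some hk
            have hrev : (xs.drop 3 ++ [x]).reverse = x :: (xs.drop 3).reverse := by simp
            rw [hrev, PySem.List.index?_cons_of_ne _ hx0, hk]
            simp only [Option.map_some, Option.getD_some]
            have hkb : k < xs.length - 3 := by
              have := hklt; simp at this; omega
            have harith : 3 + (xs.drop 3 ++ [x]).length - 1 - (k + 1)
                = 3 + (xs.drop 3).length - 1 - k := by simp; omega
            rw [harith]
            have hle : 3 + (xs.drop 3).length - 1 - k ≤ xs.length := by simp; omega
            rw [List.take_append_of_le_length hle]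
          · have hmem' : ¬ (0 : Int) ∈ xs.drop 3 ++ [x] := by simp [hmem, Ne.symm hx0]
            simp only [hmem, hmem', if_false]
            rw [List.take_append_of_le_length hx3]

-- ===== VERDICT (by name: the statement is the Claim_ definition above) =====
theorem backtrack_spec : Claim_equal_backtrack := by
  intro guess _
  unfold Spec_backtrack
  exact backtrack_eq_alt guess
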